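-- pv_equiv track=rewrite | github.com/Arsen1302/Code-copy-detector | TestData/solutions/problem_1703_3_1.py | solution_1703_3_1
-- ===== SOURCE A (Python) =====
-- from typing import List
--
-- def solution_1703_3_1(queries: List[str], dictionary: List[str]) -> List[str]:
--     def solution_1703_3_2(a, b):
--         d = 0
--         for i, j in zip(a, b):
--             if i != j:
--                 d += 1
--                 if d > 2:
--                     return False
--         return True
--     ans = []
--     for q in queries:
--         if any(solution_1703_3_2(q, d) for d in dictionary):
--             ans.append(q)
--     return ans
-- ===== SOURCE B (Python) =====
-- def solution_1703_3_1(queries, dictionary):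
--     # Inverted traversal: dictionary outer, shrinking pool of unmatched queries.
--     def close(a, b):
--         return sum(x != y for x, y in zip(a, b)) <= 2
--     remaining = list(dict.fromkeys(queries))
--     matched = set()
--     for d in dictionary:
--         if not remaining:
--             break
--         still = []
--         for q in remaining:
--             if close(q, d):
--                 matched.add(q)
--             else:
--                 still.append(q)
--         remaining = still
--     return [q for q in queries if q in matched]
-- ===== Notes on version B (the rewrite author's own statement) =====
-- stated objective: alternative
-- what changed: B inverts the loop nesting: it iterates over the dictionary once, maintaining a shrinking pool of still-unmatched distinct queries (queries leave the pool on their first match, and the loop stops early when the pool empties), counts mismatches with a full sum instead of A's early-exit counter, and finally filters the original query list by membership in the matched set.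
import Mathlib
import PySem

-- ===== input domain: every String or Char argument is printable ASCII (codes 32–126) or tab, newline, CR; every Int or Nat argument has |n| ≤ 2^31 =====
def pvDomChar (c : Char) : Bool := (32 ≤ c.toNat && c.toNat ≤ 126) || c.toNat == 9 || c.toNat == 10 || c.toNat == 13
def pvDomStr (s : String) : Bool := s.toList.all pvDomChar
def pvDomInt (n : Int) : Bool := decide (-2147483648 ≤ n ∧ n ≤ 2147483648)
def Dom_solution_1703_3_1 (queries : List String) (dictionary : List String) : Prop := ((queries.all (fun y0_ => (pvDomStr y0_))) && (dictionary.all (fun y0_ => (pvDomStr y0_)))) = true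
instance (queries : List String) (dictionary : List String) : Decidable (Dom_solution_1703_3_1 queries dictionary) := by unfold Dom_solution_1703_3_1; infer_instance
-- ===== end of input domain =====

-- B inverts the traversal (dictionary outer, a shrinking pool of still-unmatched distinct queries,
-- mismatches counted by a full sum instead of an early-exit counter); objective: alternative.

-- ===== PORT A =====
-- inner helper solution_1703_3_2: early-exit mismatch counter over zip(a, b)
def pvSol2Go : List (Char × Char) → Nat → Bool
  | [], _ => true
  | (i, j) :: rest, d =>
      if i ≠ j then
        (if d + 1 > 2 then false else pvSol2Go rest (d + 1))
      else pvSol2Go rest d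

def pvSol2 (a b : String) : Bool := pvSol2Go (a.toList.zip b.toList) 0

def solution_1703_3_1 (queries : List String) (dictionary : List String) : List String :=
  queries.foldl (fun ans q => if dictionary.any (fun d => pvSol2 q d) then ans ++ [q] else ans) []

-- ===== PORT B =====
-- close(a, b) = sum(x != y for x, y in zip(a, b)) <= 2
def pvClose (a b : String) : Bool :=
  decide ((a.toList.zip b.toList).foldl (fun s p => if p.1 != p.2 then s + 1 else s) (0 : Int) ≤ 2)

-- body of the inner 'for q in remaining' loop: matched ones go to the set, the rest stay in the pool
def pvF (d : String) (acc : List String × PySem.Set String) (q : String) : List String × PySem.Set String :=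
  if pvClose q d then (acc.1, PySem.Set.add acc.2 q) else (acc.1 ++ [q], acc.2)

-- one iteration of the dictionary loop ('break' once the pool is empty = state frozen)
def pvStep (st : List String × PySem.Set String) (d : String) : List String × PySem.Set String :=
  if st.1 = [] then st else st.1.foldl (pvF d) ([], st.2)

def solution_1703_3_1_alt (queries : List String) (dictionary : List String) : List String :=
  let st := dictionary.foldl pvStep (PySem.List.dedup queries, PySem.Set.empty)
  queries.filter (fun q => PySem.Set.contains st.2 q)

-- ===== PRECONDITION & SPEC =====
def Spec_solution_1703_3_1 (queries : List String) (dictionary : List String) (out : List String) : Prop := out = solution_1703_3_1_alt queries dictionary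
instance (queries : List String) (dictionary : List String) (out : List String) : Decidable (Spec_solution_1703_3_1 queries dictionary out) := by unfold Spec_solution_1703_3_1; infer_instance

-- ===== CLAIM (what is proved, stated in full; the proofs are below) =====
def Claim_equal_solution_1703_3_1 : Prop := ∀ (queries : List String) (dictionary : List String), Dom_solution_1703_3_1 queries dictionary → Spec_solution_1703_3_1 queries dictionary (solution_1703_3_1 queries dictionary)

-- ===== LEMMAS AND PROOFS =====

-- A's early-exit counter decides "at most 2 mismatches" (valid while the counter is still ≤ 2)
theorem pvSol2Go_eq (l : List (Char × Char)) : ∀ d : Nat, d ≤ 2 →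
    pvSol2Go l d = decide (d + l.countP (fun p => p.1 != p.2) ≤ 2) := by
  induction l with
  | nil => intro d hd; simp [pvSol2Go, hd]
  | cons p rest ih =>
    rcases p with ⟨i, j⟩
    intro d hd
    by_cases hij : i = j
    · simp [pvSol2Go, hij, ih d hd]
    · have hne : (i != j) = true := by simp [hij]
      by_cases hd2 : d + 1 > 2
      · have : d = 2 := by omega
        subst this
        simp [pvSol2Go, hij, hne]
      · have hstep : pvSol2Go ((i, j) :: rest) d = pvSol2Go rest (d + 1) := by
          simp [pvSol2Go, hij, hd2]
        rw [hstep, ih (d + 1) (by omega)]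
        simp [hne]
        constructor <;> intro h <;> omega

theorem pvSol2_eq_pvClose (a b : String) : pvSol2 a b = pvClose a b := by
  unfold pvSol2 pvClose
  rw [pvSol2Go_eq _ 0 (by omega),
      PySem.List.foldl_count_if (fun p => p.1 != p.2) (a.toList.zip b.toList) 0]
  simp only [Nat.zero_add, Int.zero_add]
  exact decide_eq_decide.mpr (by exact_mod_cast Iff.rfl)

-- the inner fold: the new pool, membership-wise
theorem pvInner_fst_mem (d : String) (x : String) : ∀ (rem acc : List String) (mat : PySem.Set String),
    (x ∈ (rem.foldl (pvF d) (acc, mat)).1 ↔ x ∈ acc ∨ (x ∈ rem ∧ pvClose x d = false)) := by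
  intro rem
  induction rem with
  | nil => intro acc mat; simp
  | cons q rest ih =>
    intro acc mat
    rw [List.foldl_cons]
    by_cases hq : pvClose q d = true
    · rw [show pvF d (acc, mat) q = (acc, PySem.Set.add mat q) from by simp [pvF, hq], ih]
      constructor
      · rintro (h | ⟨h1, h2⟩)
        · exact Or.inl h
        · exact Or.inr ⟨List.mem_cons_of_mem _ h1, h2⟩
      · rintro (h | ⟨h1, h2⟩)
        · exact Or.inl h
        · rcases List.mem_cons.mp h1 with rfl | h1
          · rw [hq] at h2; cases h2
          · exact Or.inr ⟨h1, h2⟩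
    · have hq' : pvClose q d = false := by simpa using hq
      rw [show pvF d (acc, mat) q = (acc ++ [q], mat) from by simp [pvF, hq'], ih]
      constructor
      · rintro (h | ⟨h1, h2⟩)
        · rcases List.mem_append.mp h with h | h
          · exact Or.inl h
          · rcases List.mem_singleton.mp h with rfl
            exact Or.inr ⟨List.mem_cons_self, hq'⟩
        · exact Or.inr ⟨List.mem_cons_of_mem _ h1, h2⟩
      · rintro (h | ⟨h1, h2⟩)
        · exact Or.inl (List.mem_append.mpr (Or.inl h))
        · rcases List.mem_cons.mp h1 with rfl | h1
          · exact Or.inl (List.mem_append.mpr (Or.inr (List.mem_singleton.mpr rfl)))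
          · exact Or.inr ⟨h1, h2⟩

-- the inner fold: the new matched-set, membership-wise
theorem pvInner_snd_mem (d : String) (x : String) : ∀ (rem acc : List String) (mat : PySem.Set String),
    (x ∈ (rem.foldl (pvF d) (acc, mat)).2 ↔ x ∈ mat ∨ (x ∈ rem ∧ pvClose x d = true)) := by
  intro rem
  induction rem with
  | nil => intro acc mat; simp
  | cons q rest ih =>
    intro acc mat
    rw [List.foldl_cons]
    by_cases hq : pvClose q d = true
    · rw [show pvF d (acc, mat) q = (acc, PySem.Set.add mat q) from by simp [pvF, hq], ih]
      constructor
      · rintro (h | ⟨h1, h2⟩)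
        · rcases (PySem.Set.mem_add mat q x).mp h with h | rfl
          · exact Or.inl h
          · exact Or.inr ⟨List.mem_cons_self, hq⟩
        · exact Or.inr ⟨List.mem_cons_of_mem _ h1, h2⟩
      · rintro (h | ⟨h1, h2⟩)
        · exact Or.inl ((PySem.Set.mem_add mat q x).mpr (Or.inl h))
        · rcases List.mem_cons.mp h1 with rfl | h1
          · exact Or.inl ((PySem.Set.mem_add mat x x).mpr (Or.inr rfl))
          · exact Or.inr ⟨h1, h2⟩
    · have hq' : pvClose q d = false := by simpa using hq
      rw [show pvF d (acc, mat) q = (acc ++ [q], mat) from by simp [pvF, hq'], ih]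
      constructor
      · rintro (h | ⟨h1, h2⟩)
        · exact Or.inl h
        · exact Or.inr ⟨List.mem_cons_of_mem _ h1, h2⟩
      · rintro (h | ⟨h1, h2⟩)
        · exact Or.inl h
        · rcases List.mem_cons.mp h1 with rfl | h1
          · rw [hq'] at h2; cases h2
          · exact Or.inr ⟨h1, h2⟩

-- loop invariant of B's dictionary fold
def pvGood (queries ds : List String) (st : List String × PySem.Set String) : Prop :=
  ∀ q, q ∈ queries → ((q ∈ st.2 ↔ ∃ d ∈ ds, pvClose q d = true) ∧ (q ∈ st.1 ↔ q ∉ st.2))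

theorem pvStep_good (queries ds : List String) (d : String) (st : List String × PySem.Set String)
    (h : pvGood queries ds st) : pvGood queries (ds ++ [d]) (pvStep st d) := by
  intro q hq
  obtain ⟨h1, h2⟩ := h q hq
  by_cases hrem : st.1 = []
  · -- pool empty: state frozen; everything in queries is already matched
    have hmat : q ∈ st.2 := by
      by_contra hn
      exact (by simpa [hrem] using h2.mpr hn : False)
    unfold pvStep
    rw [if_pos hrem]
    refine ⟨⟨fun _ => ?_, fun _ => hmat⟩, h2⟩
    rcases h1.mp hmat with ⟨d', hd', hc⟩
    exact ⟨d', List.mem_append.mpr (Or.inl hd'), hc⟩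
  · unfold pvStep
    rw [if_neg hrem]
    rw [pvInner_fst_mem d q st.1 [] st.2, pvInner_snd_mem d q st.1 [] st.2]
    constructor
    · constructor
      · rintro (h | ⟨hr, hc⟩)
        · rcases h1.mp h with ⟨d', hd', hc'⟩
          exact ⟨d', List.mem_append.mpr (Or.inl hd'), hc'⟩
        · exact ⟨d, List.mem_append.mpr (Or.inr (List.mem_singleton.mpr rfl)), hc⟩
      · rintro ⟨d', hd', hc'⟩
        rcases List.mem_append.mp hd' with hd' | hd'
        · exact Or.inl (h1.mpr ⟨d', hd', hc'⟩)
        · rcases List.mem_singleton.mp hd' with rfl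
          by_cases hm : q ∈ st.2
          · exact Or.inl hm
          · exact Or.inr ⟨h2.mpr hm, hc'⟩
    · constructor
      · rintro (h | ⟨hr, hc⟩)
        · cases h
        · rintro (h | ⟨_, hc'⟩)
          · exact (h2.mp hr) h
          · rw [hc] at hc'; cases hc'
      · intro hn
        by_cases hm : q ∈ st.2
        · exact absurd (Or.inl hm) hn
        · refine Or.inr ⟨h2.mpr hm, ?_⟩
          by_cases hc : pvClose q d = true
          · exact absurd (Or.inr ⟨h2.mpr hm, hc⟩) hn
          · exact Bool.not_eq_true _ ▸ hc

theorem pvFold_good (queries : List String) : ∀ (dict ds : List String) (st : List String × PySem.Set String),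
    pvGood queries ds st → pvGood queries (ds ++ dict) (dict.foldl pvStep st) := by
  intro dict
  induction dict with
  | nil => intro ds st h; simpa using h
  | cons d rest ih =>
    intro ds st h
    have := ih (ds ++ [d]) (pvStep st d) (pvStep_good queries ds d st h)
    simpa [List.append_assoc] using this

theorem pvGood_init (queries : List String) :
    pvGood queries [] (PySem.List.dedup queries, PySem.Set.empty) := by
  intro q hq
  constructor
  · simp [PySem.Set.empty]
  · simp [hq, PySem.Set.empty]

-- ===== VERDICT (by name: the statement is the Claim_ definition above) =====
theorem solution_1703_3_1_spec : Claim_equal_solution_1703_3_1 := by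
  intro queries dictionary _
  unfold Spec_solution_1703_3_1 solution_1703_3_1 solution_1703_3_1_alt
  rw [PySem.List.foldl_append_if_eq_filter (fun q => dictionary.any (fun d => pvSol2 q d)) queries []]
  rw [List.nil_append]
  apply List.filter_congr
  intro q hq
  have hg := pvFold_good queries dictionary [] (PySem.List.dedup queries, PySem.Set.empty)
      (pvGood_init queries) q hq
  have hg1 : q ∈ (dictionary.foldl pvStep (PySem.List.dedup queries, PySem.Set.empty)).2
      ↔ ∃ d ∈ dictionary, pvClose q d = true := by
    simpa using hg.1
  simp only [pvSol2_eq_pvClose]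
  rw [Bool.eq_iff_iff]
  simp only [List.any_eq_true, PySem.Set.contains]
  constructor
  · rintro ⟨d', hd', hc⟩
    simpa using hg1.mpr ⟨d', hd', hc⟩
  · intro h
    exact hg1.mp (by simpa using h)
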